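-- pv_equiv track=rewrite | github.com/nbn-03/thuattoantrong-ATTT | bai21.py | check_ssnt
-- ===== SOURCE A (Python) =====
-- def check_snt(n):
--     a =0
--     for i in range(1,n+1):
--         if(n%i==0):
--             a =a+1
--     if(a==2):
--         return True
--     return False
--
-- def check_ssnt(n):
--     dem = 0
--     for i in range(1,n):
--         if(check_snt(i)==True and check_snt(n)==True):
--             dem = dem +1
--     if(check_snt(dem)==True):
--         return True
--     return False
-- ===== SOURCE B (Python) =====
-- def check_ssnt(n):
--     def is_prime(m):
--         if m < 2:
--             return False
--         d = 2
--         while d * d <= m: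
--             if m % d == 0:
--                 return False
--             d += 1
--         return True
--
--     if not is_prime(n):
--         return False
--     dem = 0
--     for i in range(2, n):
--         if is_prime(i):
--             dem += 1
--     return is_prime(dem)
-- ===== Notes on version B (the rewrite author's own statement) =====
-- stated objective: faster
-- what changed: B replaces A's divisor-counting primality test (count all divisors in 1..m, compare to 2) and A's per-iteration re-test of n with a sqrt-bounded trial-division is_prime, testing n once up front and counting primes below n in one pass.
import Mathlib
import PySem

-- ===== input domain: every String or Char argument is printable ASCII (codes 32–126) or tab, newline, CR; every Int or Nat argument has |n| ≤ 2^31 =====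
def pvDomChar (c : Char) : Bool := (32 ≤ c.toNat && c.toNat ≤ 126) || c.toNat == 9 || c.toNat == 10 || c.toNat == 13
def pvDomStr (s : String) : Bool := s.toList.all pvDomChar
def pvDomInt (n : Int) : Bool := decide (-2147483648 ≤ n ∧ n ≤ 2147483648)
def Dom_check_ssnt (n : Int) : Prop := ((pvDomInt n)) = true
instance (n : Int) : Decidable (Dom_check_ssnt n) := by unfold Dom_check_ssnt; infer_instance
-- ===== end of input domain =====

-- B replaces A's divisor-counting primality test with sqrt-bounded trial division
-- and tests n's primality once instead of on every loop iteration (faster).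

-- ===== PORT A =====
def check_snt (n : Int) : Bool :=
  let a := (PySem.List.pyRange 1 (n + 1) 1).foldl
    (fun a i => if PySem.Int.mod n i = 0 then a + 1 else a) (0 : Int)
  if a = 2 then true else false

def check_ssnt (n : Int) : Bool :=
  let dem := (PySem.List.pyRange 1 n 1).foldl
    (fun dem i => if check_snt i == true && check_snt n == true then dem + 1 else dem) (0 : Int)
  if check_snt dem then true else false

-- ===== PORT B =====
-- the 'while d * d <= m' loop of Source B's is_prime
def isPrimeLoop (m d : Int) : Bool :=
  if h : d * d ≤ m then
    if PySem.Int.mod m d = 0 then false else isPrimeLoop m (d + 1)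
  else true
termination_by (m + 1 - d).toNat
decreasing_by
  have hdm : d ≤ m := by nlinarith [sq_nonneg d, sq_nonneg (d - 1)]
  omega

def isPrime (m : Int) : Bool :=
  if m < 2 then false else isPrimeLoop m 2

def check_ssnt_alt (n : Int) : Bool :=
  if !isPrime n then false
  else
    let dem := (PySem.List.pyRange 2 n 1).foldl
      (fun c i => if isPrime i then c + 1 else c) (0 : Int)
    isPrime dem

-- ===== PRECONDITION & SPEC =====
def Spec_check_ssnt (n : Int) (out : Bool) : Prop := out = check_ssnt_alt n
instance (n : Int) (out : Bool) : Decidable (Spec_check_ssnt n out) := by unfold Spec_check_ssnt; infer_instance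

-- ===== CLAIM (what is proved, stated in full; the proofs are below) =====
def Claim_equal_check_ssnt : Prop := ∀ (n : Int), Dom_check_ssnt n → Spec_check_ssnt n (check_ssnt n)

-- ===== LEMMAS AND PROOFS =====

-- check_snt m is true iff the divisor count of m over 1..m equals 2
theorem check_snt_eq_countP (m : Int) :
    check_snt m =
      (((PySem.List.pyRange 1 (m + 1) 1).countP (fun i => PySem.Int.mod m i = 0) : Int) == 2) := by
  unfold check_snt
  rw [PySem.List.foldl_ite_add_one]
  simp only [zero_add]
  rcases h : ((List.countP (fun x => decide (PySem.Int.mod m x = 0)) (PySem.List.pyRange 1 (m + 1)) : Int)) == 2 with _ | _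
  · simp_all
  · simp_all

-- the while-loop of is_prime: true iff no divisor d ≤ √m from 'd' upward
theorem isPrimeLoop_iff (m d : Int) (hd : 0 ≤ d) :
    isPrimeLoop m d = true ↔ ∀ e : Int, d ≤ e → e * e ≤ m → PySem.Int.mod m e ≠ 0 := by
  induction d using isPrimeLoop.induct (m := m) with
  | case1 d h hmod =>
    rw [isPrimeLoop, dif_pos h, if_pos hmod]
    constructor
    · intro hfalse; exact absurd hfalse (by simp)
    · intro hall; exact absurd hmod (hall d (le_refl d) h)
  | case2 d h hmod ih =>
    rw [isPrimeLoop, dif_pos h, if_neg hmod, ih (by omega)]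
    constructor
    · intro hall e hde hee
      rcases eq_or_lt_of_le hde with rfl | hlt
      · exact hmod
      · exact hall e (by omega) hee
    · intro hall e hde hee
      exact hall e (by omega) hee
  | case3 d h =>
    rw [isPrimeLoop, dif_neg h]
    simp only [true_iff]
    intro e hde hee hm
    exact h (by nlinarith)

theorem isPrime_iff (m : Int) :
    isPrime m = true ↔ 2 ≤ m ∧ ∀ e : Int, 2 ≤ e → e * e ≤ m → ¬ (e ∣ m) := by
  unfold isPrime
  by_cases h : m < 2
  · simp only [h, if_pos]
    constructor
    · intro hf; exact absurd hf (by simp)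
    · intro ⟨h2, _⟩; omega
  · rw [if_neg h, isPrimeLoop_iff m 2 (by omega)]
    constructor
    · intro hall
      refine ⟨by omega, fun e he hee hdvd => ?_⟩
      exact hall e he hee ((PySem.Int.mod_eq_zero_iff_dvd m e).mpr hdvd)
    · intro ⟨_, hall⟩ e he hee hm
      exact hall e he hee ((PySem.Int.mod_eq_zero_iff_dvd m e).mp hm)

theorem check_snt_iff (m : Int) :
    check_snt m = true ↔ 2 ≤ m ∧ ∀ d : Int, 2 ≤ d → d < m → ¬ (d ∣ m) := by
  rw [check_snt_eq_countP]
  by_cases h2 : 2 ≤ m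
  · have hsplit : PySem.List.pyRange 1 (m + 1) =
        PySem.List.pyRange 1 2 ++ (PySem.List.pyRange 2 m ++ [m]) := by
      rw [← PySem.List.pyRange_one_succ_right (by omega : (2:Int) ≤ m),
          ← PySem.List.pyRange_one_append 1 2 (m + 1) (by omega) (by omega)]
    have h1 : PySem.List.pyRange 1 2 = [1] := by
      rw [PySem.List.pyRange_one_cons (by omega), PySem.List.pyRange_one_eq_nil (by omega)]
    have hm1 : PySem.Int.mod m 1 = 0 := (PySem.Int.mod_eq_zero_iff_dvd m 1).mpr (one_dvd m)
    have hmm : PySem.Int.mod m m = 0 := (PySem.Int.mod_eq_zero_iff_dvd m m).mpr dvd_rfl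
    rw [hsplit, h1, beq_iff_eq]
    simp only [List.countP_append, List.countP_cons, List.countP_nil, hm1, hmm,
      decide_true, if_true]
    set k := List.countP (fun x => decide (PySem.Int.mod m x = 0)) (PySem.List.pyRange 2 m)
      with hkdef
    have hk0 : (((0 + 1 + (k + (0 + 1)) : Nat) : Int) = 2) ↔ k = 0 := by
      constructor
      · intro h; omega
      · intro h; omega
    rw [hk0, hkdef, List.countP_eq_zero]
    constructor
    · intro hz
      refine ⟨h2, fun d hd hdm hdvd => ?_⟩
      have : d ∈ PySem.List.pyRange 2 m := by
        rw [PySem.List.mem_pyRange_one]; exact ⟨hd, hdm⟩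
      have := hz d this
      simp only [decide_eq_true_eq] at this
      exact this ((PySem.Int.mod_eq_zero_iff_dvd m d).mpr hdvd)
    · intro ⟨_, hall⟩ d hdmem
      rw [PySem.List.mem_pyRange_one] at hdmem
      simp only [decide_eq_true_eq]
      intro hmod
      exact hall d hdmem.1 hdmem.2 ((PySem.Int.mod_eq_zero_iff_dvd m d).mp hmod)
  · -- m ≤ 1 : count is 0 (m ≤ 0) or 1 (m = 1); never 2
    constructor
    · intro hcnt
      exfalso
      rcases le_or_gt m 0 with hm0 | hm1
      · rw [PySem.List.pyRange_one_eq_nil (by omega)] at hcnt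
        simp at hcnt
      · have hm : m = 1 := by omega
        subst hm
        revert hcnt
        decide
    · intro ⟨h, _⟩; exact absurd h h2

-- the two primality characterisations agree
theorem check_snt_eq_isPrime (m : Int) : check_snt m = isPrime m := by
  by_cases hp : isPrime m = true
  · rw [hp]
    rw [check_snt_iff]
    obtain ⟨h2, hall⟩ := (isPrime_iff m).mp hp
    refine ⟨h2, fun d hd hdm hdvd => ?_⟩
    obtain ⟨e, hme⟩ := id hdvd
    have he1 : 1 ≤ e := by nlinarith
    have hne1 : e ≠ 1 := by intro h; rw [h, mul_one] at hme; omega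
    have he2 : 2 ≤ e := by omega
    by_cases hdd : d * d ≤ m
    · exact hall d hd hdd hdvd
    · have hed : e < d := by nlinarith
      have hee : e * e ≤ m := by nlinarith
      exact hall e he2 hee ⟨d, by rw [hme, mul_comm]⟩
  · have hp' : isPrime m = false := by simpa using hp
    rw [hp']
    by_contra hc
    have hct : check_snt m = true := by simpa using hc
    obtain ⟨h2, hall⟩ := (check_snt_iff m).mp hct
    apply hp
    rw [isPrime_iff]
    refine ⟨h2, fun e he hee hdvd => ?_⟩
    have hem : e ≤ m := Int.le_of_dvd (by omega) hdvd
    have helt : e < m := by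
      rcases eq_or_lt_of_le hem with rfl | h; · nlinarith
      · exact h
    exact hall e he helt hdvd

-- ===== VERDICT (by name: the statement is the Claim_ definition above) =====
theorem check_ssnt_spec : Claim_equal_check_ssnt := by
  intro n _
  unfold Spec_check_ssnt check_ssnt check_ssnt_alt
  by_cases hp : isPrime n = true
  · have hcs : check_snt n = true := by rw [check_snt_eq_isPrime]; exact hp
    have h2 : 2 ≤ n := ((isPrime_iff n).mp hp).1
    rw [hp]
    simp only [Bool.not_true, Bool.false_eq_true, if_false]
    have hfold : (PySem.List.pyRange 1 n).foldl
        (fun dem i => if check_snt i == true && check_snt n == true then dem + 1 else dem) (0 : Int) =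
        (PySem.List.pyRange 1 n).foldl (fun dem i => if check_snt i then dem + 1 else dem) (0 : Int) := by
      apply PySem.List.foldl_congr_mem
      intro acc x _
      simp [hcs]
    rw [hfold, PySem.List.foldl_if_add_one, PySem.List.foldl_if_add_one,
        PySem.List.pyRange_one_cons (by omega : (1:Int) < n)]
    rw [List.countP_cons]
    have hc1 : check_snt 1 = false := by decide
    rw [hc1]
    simp only [Bool.false_eq_true, if_false, Nat.add_zero]
    rw [List.countP_congr (fun x _ => by rw [check_snt_eq_isPrime])]
    rw [check_snt_eq_isPrime]
    simp only [zero_add]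
    cases hdem : isPrime ((List.countP isPrime (PySem.List.pyRange 2 n) : Nat) : Int) <;>
      simp [hdem]
  · have hp' : isPrime n = false := by simpa using hp
    have hcs : check_snt n = false := by rw [check_snt_eq_isPrime]; exact hp'
    rw [hp']
    simp only [Bool.not_false, if_true]
    have hfold : (PySem.List.pyRange 1 n).foldl
        (fun dem i => if check_snt i == true && check_snt n == true then dem + 1 else dem) (0 : Int) =
        (0 : Int) := by
      rw [show (fun (dem : Int) (i : Int) =>
            if check_snt i == true && check_snt n == true then dem + 1 else dem) =
          (fun (dem : Int) (i : Int) => dem) from funext fun dem => funext fun i => by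
            simp [hcs]]
      exact PySem.List.foldl_ignore _ _
    rw [hfold]
    have hc0 : check_snt 0 = false := by decide
    rw [hc0]
    simp
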